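-- pv_equiv track=rewrite | github.com/Andreasbirch/Helper-functions | ARD.py | LocalDensity
-- ===== SOURCE A (Python) =====
-- def LocalDensity(list):
--     localSum = 0
--     for i in range(len(list)):
--         try:
--             localSum = localSum + list[1][i]
--         except(IndexError):
--             return list[1][0]
--     return localSum
-- ===== SOURCE B (Python) =====
-- def _go(outer, inner):
--     # Walk the two lists in lockstep by structural recursion.
--     # Returns None if inner runs out before outer (signal the fallback),
--     # otherwise the sum of the consumed inner elements.
--     if not outer:
--         return 0
--     if not inner:
--         return None
--     rest = _go(outer[1:], inner[1:])
--     return None if rest is None else inner[0] + rest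
--
-- def LocalDensity(list):
--     if not list:
--         return 0
--     r = _go(list, list[1])
--     return list[1][0] if r is None else r
-- ===== Notes on version B (the rewrite author's own statement) =====
-- stated objective: alternative
-- what changed: Replaces the try/except indexed accumulating loop by a simultaneous structural recursion over the outer list and list[1] (no indices, lengths or exception handling), using an Option-style None to signal the short-inner fallback list[1][0].
-- outside the precondition, e.g. on LocalDensity([[5]]): A raises IndexError, B raises IndexError; on LocalDensity([[1], []]): A raises IndexError, B raises IndexError
import Mathlib
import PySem

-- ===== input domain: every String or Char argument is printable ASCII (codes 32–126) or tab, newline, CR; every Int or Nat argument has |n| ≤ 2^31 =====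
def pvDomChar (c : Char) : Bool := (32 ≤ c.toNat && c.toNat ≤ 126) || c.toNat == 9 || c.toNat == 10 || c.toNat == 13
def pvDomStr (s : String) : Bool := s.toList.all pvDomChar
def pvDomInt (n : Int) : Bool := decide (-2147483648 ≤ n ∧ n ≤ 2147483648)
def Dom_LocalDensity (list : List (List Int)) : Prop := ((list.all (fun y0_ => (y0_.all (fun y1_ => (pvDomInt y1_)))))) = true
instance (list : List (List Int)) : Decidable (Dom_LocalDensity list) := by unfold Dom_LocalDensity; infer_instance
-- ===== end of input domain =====

-- B replaces A's try/except indexed loop by a lockstep structural recursion over the outer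
-- list and list[1], with an Option signalling the short-inner fallback (alternative).

-- ===== PORT A =====
-- the for-loop over range(len(list)); an out-of-range list[1][i] (IndexError) triggers the
-- except branch 'return list[1][0]'; its own IndexError is excluded by Pre_, default 0 unreached there
def LocalDensityGo (list : List (List Int)) : List Int → Int → Int
  | [], acc => acc
  | i :: rest, acc =>
    match PySem.List.pyGet? ((PySem.List.pyGet? list 1).getD []) i with
    | some v => LocalDensityGo list rest (acc + v)
    | none => PySem.List.pyGetD ((PySem.List.pyGet? list 1).getD []) 0 0

def LocalDensity (list : List (List Int)) : Int :=
  LocalDensityGo list (PySem.List.pyRange 0 (list.length : Int) 1) 0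

-- ===== PORT B =====
-- _go: simultaneous structural recursion; none = inner ran out before outer
def LDgo : List (List Int) → List Int → Option Int
  | [], _ => some 0
  | _ :: _, [] => none
  | _ :: os, x :: is =>
    match LDgo os is with
    | none => none
    | some rest => some (x + rest)

def LocalDensity_alt (list : List (List Int)) : Int :=
  if list = [] then 0
  else
    let inner := (PySem.List.pyGet? list 1).getD []
    match LDgo list inner with
    | none => PySem.List.pyGetD inner 0 0
    | some r => r

-- ===== PRECONDITION & SPEC =====
-- Pre_ excludes exactly the inputs where A raises IndexError: a one-element outer list
-- (list[1] itself raises, and so does the except's list[1][0]) and an empty list[1] with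
-- len(list) ≥ 2 (the except's list[1][0] raises).  B raises there too.
def Pre_LocalDensity (list : List (List Int)) : Prop :=
  list = [] ∨ (2 ≤ list.length ∧ list.getD 1 [] ≠ [])
instance (list : List (List Int)) : Decidable (Pre_LocalDensity list) := by
  unfold Pre_LocalDensity; infer_instance

def pvWitness_LocalDensity : List (List Int) := [[1], [2, 3], [4]]

def Spec_LocalDensity (list : List (List Int)) (out : Int) : Prop := out = LocalDensity_alt list
instance (list : List (List Int)) (out : Int) : Decidable (Spec_LocalDensity list out) := by
  unfold Spec_LocalDensity; infer_instance

-- ===== CLAIM (what is proved, stated in full; the proofs are below) =====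
def Claim_equal_LocalDensity : Prop := ∀ (list : List (List Int)), Dom_LocalDensity list → Pre_LocalDensity list → Spec_LocalDensity list (LocalDensity list)

-- ===== LEMMAS AND PROOFS =====

-- characterisation of B's recursion
lemma LDgo_eq (outer : List (List Int)) (inner : List Int) :
    LDgo outer inner =
      if outer.length ≤ inner.length then some ((inner.take outer.length).sum) else none := by
  induction outer generalizing inner with
  | nil => simp [LDgo]
  | cons o os ih =>
    cases inner with
    | nil => simp [LDgo]
    | cons x is =>
      simp only [LDgo, ih is, List.length_cons]
      by_cases h : os.length ≤ is.length
      · rw [if_pos h, if_pos (by omega)]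
        simp [List.take_succ_cons]
      · rw [if_neg h, if_neg (by omega)]

-- loop invariant for A, long-inner case: the loop sums list[1][a..n-1]
lemma LD_go_sum (list : List (List Int)) (a : Nat) (acc : Int)
    (h : a ≤ list.length)
    (hlen : list.length ≤ ((PySem.List.pyGet? list 1).getD []).length) :
    LocalDensityGo list (PySem.List.pyRange (a : Int) (list.length : Int) 1) acc
      = acc + ((((PySem.List.pyGet? list 1).getD []).drop a).take (list.length - a)).sum := by
  set l1 := (PySem.List.pyGet? list 1).getD [] with hl1
  induction hk : list.length - a generalizing a acc with
  | zero =>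
    have ha : a = list.length := by omega
    subst ha
    rw [PySem.List.pyRange_one_eq_nil (by omega)]
    simp [LocalDensityGo]
  | succ k ih =>
    have ha : a < list.length := by omega
    rw [PySem.List.pyRange_one_cons (by exact_mod_cast ha)]
    have hget : PySem.List.pyGet? l1 (a : Int) = some l1[a] := by
      rw [PySem.List.pyGet?_natCast]
      exact List.getElem?_eq_getElem (by omega)
    simp only [LocalDensityGo, ← hl1, hget]
    have hrec := ih (a + 1) (acc + l1[a]) (by omega) (by omega)
    have hcast : ((a : Int) + 1) = (((a + 1 : Nat)) : Int) := by push_cast; ring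
    rw [hcast, hrec]
    have hdrop : l1.drop a = l1[a] :: l1.drop (a + 1) :=
      List.drop_eq_getElem_cons (by omega)
    rw [hdrop]
    simp only [List.take_succ_cons, List.sum_cons]
    ring

-- loop invariant for A, short-inner case: the loop reaches index len(list[1]) and returns list[1][0]
lemma LD_go_head (list : List (List Int)) (a : Nat) (acc : Int)
    (h : a ≤ ((PySem.List.pyGet? list 1).getD []).length)
    (hlen : ((PySem.List.pyGet? list 1).getD []).length < list.length) :
    LocalDensityGo list (PySem.List.pyRange (a : Int) (list.length : Int) 1) acc
      = PySem.List.pyGetD ((PySem.List.pyGet? list 1).getD []) 0 0 := by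
  set l1 := (PySem.List.pyGet? list 1).getD [] with hl1
  induction hk : l1.length - a generalizing a acc with
  | zero =>
    have ha : a = l1.length := by omega
    subst ha
    rw [PySem.List.pyRange_one_cons (by exact_mod_cast hlen)]
    have hget : PySem.List.pyGet? l1 (l1.length : Int) = none := by
      rw [PySem.List.pyGet?_natCast]
      exact List.getElem?_eq_none (by omega)
    simp only [LocalDensityGo, ← hl1, hget]
  | succ k ih =>
    have ha : a < l1.length := by omega
    rw [PySem.List.pyRange_one_cons (by exact_mod_cast (by omega : a < list.length))]
    have hget : PySem.List.pyGet? l1 (a : Int) = some l1[a] := by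
      rw [PySem.List.pyGet?_natCast]
      exact List.getElem?_eq_getElem (by omega)
    simp only [LocalDensityGo, ← hl1, hget]
    have hcast : ((a : Int) + 1) = (((a + 1 : Nat)) : Int) := by push_cast; ring
    rw [hcast]
    exact ih (a + 1) (acc + l1[a]) (by omega) (by omega)

-- ===== VERDICT (by name: the statement is the Claim_ definition above) =====
theorem LocalDensity_spec : Claim_equal_LocalDensity := by
  intro list _hdom hpre
  unfold Spec_LocalDensity LocalDensity LocalDensity_alt
  rcases hpre with h0 | ⟨h2, hne⟩
  · subst h0
    rw [PySem.List.pyRange_one_eq_nil (by simp)]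
    simp [LocalDensityGo]
  · have hn : list ≠ [] := by intro h; subst h; simp at h2
    rw [if_neg hn]
    set l1 := (PySem.List.pyGet? list 1).getD [] with hl1
    simp only [LDgo_eq]
    split_ifs with hle
    · have := LD_go_sum list 0 0 (by omega) (by rw [← hl1]; omega)
      simp only [Nat.cast_zero] at this
      simpa using this
    · have := LD_go_head list 0 0 (by omega) (by rw [← hl1]; omega)
      simpa using this
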